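-- pv_equiv track=rewrite | github.com/qq793199244/HuaWeiCode | HJ26字符串排序.py | func
-- ===== SOURCE A (Python) =====
-- def func(s):
--     ch = ''
--     for c in s:
--         if c.isalpha():
--             ch += c
--     new_ch = sorted(ch, key=str.upper)
--     res = ''
--     idx = 0
--     for i in range(len(s)):
--         if s[i].isalpha():
--             res += new_ch[idx]
--             idx += 1
--         else:
--             res += s[i]
--     return res
-- ===== SOURCE B (Python) =====
-- def func(s):
--     # group letters by uppercase key (insertion order keeps stability),
--     # then emit bucket contents in key order at the alphabetic positions
--     buckets = {}
--     for c in s: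
--         if c.isalpha():
--             buckets.setdefault(c.upper(), []).append(c)
--     ordered = []
--     for k in sorted(buckets):
--         ordered.extend(buckets[k])
--     it = iter(ordered)
--     out = []
--     for c in s:
--         out.append(next(it) if c.isalpha() else c)
--     return ''.join(out)
-- ===== Notes on version B (the rewrite author's own statement) =====
-- stated objective: alternative
-- what changed: Replaces the stable comparison sort of all letters by a one-pass grouping table keyed by uppercase letter (insertion order gives stability) whose distinct keys are sorted instead, and replaces the index-tracking rebuild by an iterator over the flattened buckets.
import Mathlib
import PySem

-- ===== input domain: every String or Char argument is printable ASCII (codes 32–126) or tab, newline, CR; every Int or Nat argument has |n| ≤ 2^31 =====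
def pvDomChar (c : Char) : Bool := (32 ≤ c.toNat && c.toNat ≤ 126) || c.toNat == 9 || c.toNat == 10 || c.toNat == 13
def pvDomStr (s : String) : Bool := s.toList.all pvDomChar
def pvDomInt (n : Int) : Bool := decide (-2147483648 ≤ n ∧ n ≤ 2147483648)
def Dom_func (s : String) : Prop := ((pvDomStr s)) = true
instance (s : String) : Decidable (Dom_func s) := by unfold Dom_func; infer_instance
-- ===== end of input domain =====

-- B replaces the stable comparison sort of all letters by a one-pass grouping table keyed by
-- uppercase letter (only the distinct keys get sorted) and rebuilds via an iterator (objective: alternative).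

-- ===== PORT A =====
-- A's rebuild loop body: state = (res, idx), c = s[i]
def stepA (newCh : List Char) (st : List Char × Int) (c : Char) : List Char × Int :=
  if PySem.Chars.isalpha c then (st.1 ++ [PySem.List.pyGetD newCh st.2 ' '], st.2 + 1)
  else (st.1 ++ [c], st.2)

def func (s : String) : String :=
  let cs := s.toList
  -- ch = '' ; for c in s: if c.isalpha(): ch += c
  let ch := cs.foldl (fun acc c => if PySem.Chars.isalpha c then acc ++ [c] else acc) []
  -- new_ch = sorted(ch, key=str.upper)
  let newCh := PySem.List.sorted ch (fun c => PySem.Chars.upperChar c)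
  -- res = '' ; idx = 0 ; for i in range(len(s)): …  (new_ch[idx] is always in range; ' ' is a totality default)
  let out := (PySem.List.pyRange 0 (PySem.List.len cs)).foldl
      (fun st i => stepA newCh st (PySem.List.pyGetD cs i ' ')) ([], 0)
  String.ofList out.1

-- ===== PORT B =====
-- B's rebuild loop body: state = (out, iterator-remainder); next(it) = headD/tail (never exhausted; c is a totality default)
def stepB (st : List Char × List Char) (c : Char) : List Char × List Char :=
  if PySem.Chars.isalpha c then (st.1 ++ [st.2.headD c], st.2.tail)
  else (st.1 ++ [c], st.2)

def func_alt (s : String) : String :=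
  let cs := s.toList
  -- for c in s: if c.isalpha(): buckets.setdefault(c.upper(), []).append(c)
  let buckets := cs.foldl
      (fun d c => if PySem.Chars.isalpha c
                  then d.modify (PySem.Chars.upperChar c) [] (· ++ [c]) else d)
      (PySem.Dict.empty : PySem.Dict Char (List Char))
  -- ordered = [] ; for k in sorted(buckets): ordered.extend(buckets[k])
  let ordered := (PySem.List.sorted buckets.keys (fun k => k)).foldl
      (fun acc k => acc ++ buckets.getD k []) []
  -- it = iter(ordered) ; for c in s: out.append(next(it) if c.isalpha() else c)
  let out := cs.foldl stepB ([], ordered)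
  String.ofList out.1

-- ===== PRECONDITION & SPEC =====
def Spec_func (s : String) (out : String) : Prop := out = func_alt s
instance (s : String) (out : String) : Decidable (Spec_func s out) := by unfold Spec_func; infer_instance

-- ===== CLAIM (what is proved, stated in full; the proofs are below) =====
def Claim_equal_func : Prop := ∀ (s : String), Dom_func s → Spec_func s (func s)

-- ===== LEMMAS AND PROOFS =====

-- insertBy walks past a prefix none of whose elements x goes before
theorem insertBy_pass {α : Type} (bef : α → α → Bool) (x : α) (as bs : List α)
    (h : ∀ a ∈ as, bef x a = false) :
    PySem.List.insertBy bef x (as ++ bs) = as ++ PySem.List.insertBy bef x bs := by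
  induction as with
  | nil => simp
  | cons a t ih =>
      have ha := h a (by simp)
      simp [PySem.List.insertBy, ha, ih (fun a ha' => h a (by simp [ha']))]

-- insertBy stops immediately when x goes before everything
theorem insertBy_head {α : Type} (bef : α → α → Bool) (x : α) (bs : List α)
    (h : ∀ b ∈ bs, bef x b = true) :
    PySem.List.insertBy bef x bs = x :: bs := by
  cases bs with
  | nil => simp [PySem.List.insertBy]
  | cons b t => simp [PySem.List.insertBy, h b (by simp)]

-- inserting x into key-grouped blocks (strictly increasing block keys) appends x to its block
theorem insert_grouped {α κ : Type} [LinearOrder κ] [BEq κ] [LawfulBEq κ]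
    (key : α → κ) (x : α) :
    ∀ (ks : List κ) (g : κ → List α), ks.Pairwise (· < ·) → key x ∈ ks →
      (∀ j ∈ ks, ∀ y ∈ g j, key y = j) →
      PySem.List.insertBy (fun a b => decide (key a < key b)) x (ks.flatMap g)
        = ks.flatMap (fun j => g j ++ if key x == j then [x] else []) := by
  intro ks
  induction ks with
  | nil => intro g _ hx _; simp at hx
  | cons j ks' ih =>
      intro g hpw hx hg
      have hlt : ∀ k ∈ ks', j < k := (List.pairwise_cons.mp hpw).1
      rw [List.flatMap_cons, List.flatMap_cons]
      by_cases hxj : key x = j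
      · have hpass : ∀ a ∈ g j, (fun a b => decide (key a < key b)) x a = false := by
          intro a ha
          have hk := hg j (by simp) a ha
          simp [hk, hxj]
        have hhead : ∀ b ∈ ks'.flatMap g, (fun a b => decide (key a < key b)) x b = true := by
          intro b hb
          rcases List.mem_flatMap.mp hb with ⟨j', hj', hbj'⟩
          have hk := hg j' (by simp [hj']) b hbj'
          simp [hk, hxj]
          exact hlt j' hj'
        rw [insertBy_pass _ _ _ _ hpass, insertBy_head _ _ _ hhead]
        have hrest : ks'.flatMap (fun j' => g j' ++ if key x == j' then [x] else [])
            = ks'.flatMap g := by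
          apply List.flatMap_congr
          intro j' hj'
          have hne : ¬ (key x = j') := by
            have := hlt j' hj'
            rw [hxj]
            exact ne_of_lt this
          simp [hne]
        rw [hrest]
        simp [hxj]
      · have hx' : key x ∈ ks' := by
          rcases List.mem_cons.mp hx with h | h
          · exact absurd h hxj
          · exact h
        have hjx : j < key x := hlt _ hx'
        have hpass : ∀ a ∈ g j, (fun a b => decide (key a < key b)) x a = false := by
          intro a ha
          have hk := hg j (by simp) a ha
          simp [hk]
          exact le_of_lt hjx
        rw [insertBy_pass _ _ _ _ hpass,
            ih g (List.pairwise_cons.mp hpw).2 hx' (fun j' hj' => hg j' (by simp [hj']))]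
        have : ¬ (key x = j) := hxj
        simp [this]

-- grouped-by-sorted-keys concatenation IS the stable sort
theorem group_sorted {α κ : Type} [LinearOrder κ] [BEq κ] [LawfulBEq κ] (key : α → κ) :
    ∀ (l : List α) (ks : List κ), ks.Pairwise (· < ·) → (∀ y ∈ l, key y ∈ ks) →
      ks.flatMap (fun j => l.filter (fun y => key y == j)) = PySem.List.sorted l key := by
  intro l
  induction l using List.reverseRecOn with
  | nil =>
      intro ks _ _
      simp [PySem.List.sorted_eq_foldl_insertBy]
  | append_singleton l x IH =>
      intro ks hpw hmem
      have hmem' : ∀ y ∈ l, key y ∈ ks := fun y hy => hmem y (by simp [hy])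
      have hxk : key x ∈ ks := hmem x (by simp)
      rw [PySem.List.sorted_eq_foldl_insertBy, List.foldl_append]
      simp only [List.foldl_cons, List.foldl_nil]
      rw [← PySem.List.sorted_eq_foldl_insertBy, ← IH ks hpw hmem',
          insert_grouped key x ks _ hpw hxk
            (by intro j hj y hy; simpa using (List.mem_filter.mp hy).2)]
      apply List.flatMap_congr
      intro j hj
      rw [List.filter_append]
      by_cases h : key x = j <;> simp [h]

-- the two rebuild passes agree while the iterator cannot exhaust
theorem merge_eq (newCh : List Char) :
    ∀ (cs : List Char) (idx : Nat) (res : List Char),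
      idx + cs.countP PySem.Chars.isalpha ≤ newCh.length →
      (cs.foldl (stepA newCh) (res, (idx : Int))).1
        = (cs.foldl stepB (res, newCh.drop idx)).1 := by
  intro cs
  induction cs with
  | nil => intro idx res _; simp
  | cons c t ih =>
      intro idx res hle
      by_cases hc : PySem.Chars.isalpha c = true
      · have hcount : t.countP PySem.Chars.isalpha + 1 = (c :: t).countP PySem.Chars.isalpha := by
          simp [hc]
        have hidx : idx < newCh.length := by omega
        have hgetA : PySem.List.pyGetD newCh ((idx : Nat) : Int) ' ' = newCh[idx] := by
          rw [PySem.List.pyGetD_natCast]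
          exact List.getD_eq_getElem _ _ hidx
        have hgetB : (newCh.drop idx).headD c = newCh[idx] := by
          rw [List.headD_eq_head?_getD, List.head?_drop, List.getElem?_eq_getElem hidx]
          rfl
        simp only [List.foldl_cons, stepA, stepB, hc, if_true, hgetA, hgetB, List.tail_drop]
        have : ((idx : Int) + 1) = ((idx + 1 : Nat) : Int) := by push_cast; ring
        rw [this, ih (idx + 1) (res ++ [newCh[idx]]) (by omega)]
      · have hc' : PySem.Chars.isalpha c = false := by simpa using hc
        simp only [List.foldl_cons, stepA, stepB, hc', if_false, Bool.false_eq_true]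
        exact ih idx (res ++ [c]) (by simp [hc'] at hle ⊢; omega)

-- ===== VERDICT (by name: the statement is the Claim_ definition above) =====
theorem func_spec : Claim_equal_func := by
  intro s _
  unfold Spec_func func func_alt
  dsimp only
  set cs := s.toList with hcs
  set letters := cs.filter PySem.Chars.isalpha with hl
  -- A's first loop is the alpha filter
  have hch : cs.foldl (fun acc c => if PySem.Chars.isalpha c then acc ++ [c] else acc)
      ([] : List Char) = letters := by
    simpa using PySem.List.foldl_append_if_eq_filter PySem.Chars.isalpha cs []
  rw [hch]
  set newCh := PySem.List.sorted letters (fun c => PySem.Chars.upperChar c) with hnew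
  set buckets := cs.foldl
      (fun d c => if PySem.Chars.isalpha c
                  then d.modify (PySem.Chars.upperChar c) [] (· ++ [c]) else d)
      (PySem.Dict.empty : PySem.Dict Char (List Char)) with hb
  -- B's grouping loop, re-expressed over the filtered letters, then over key/value pairs
  have hbuck : buckets
      = (letters.map (fun c => (PySem.Chars.upperChar c, c))).foldl
          (fun d p => d.modify p.1 [] (· ++ [p.2])) PySem.Dict.empty := by
    rw [hb, hl, List.foldl_map, List.foldl_filter]
  have hgetD : ∀ j, buckets.getD j [] = letters.filter (fun c => PySem.Chars.upperChar c == j) := by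
    intro j
    rw [hbuck, PySem.Dict.getD_foldl_modify_append]
    simp [List.filter_map, Function.comp_def]
  have hkeys : buckets.keys = PySem.Set.ofList (letters.map PySem.Chars.upperChar) := by
    rw [hbuck, PySem.Dict.keys_foldl_modify_key]
    simp [PySem.Set.update_nil_left, Function.comp_def]
  -- B's flattening loop produces exactly A's stable sort of the letters
  have hord : (PySem.List.sorted buckets.keys (fun k => k)).foldl
      (fun acc k => acc ++ buckets.getD k []) [] = newCh := by
    rw [PySem.List.foldl_append_eq_flatMap, List.nil_append,
        show (fun k => buckets.getD k []) =
          (fun k => letters.filter (fun c => PySem.Chars.upperChar c == k)) from funext hgetD,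
        hkeys]
    exact group_sorted PySem.Chars.upperChar letters _
      (PySem.List.sorted_ofList_pairwise_lt _)
      (by intro y hy
          rw [PySem.List.mem_sorted, PySem.Set.mem_ofList]
          exact List.mem_map_of_mem hy)
  rw [hord]
  -- A's index rebuild loop = fold over the characters
  have hA : (PySem.List.pyRange 0 (PySem.List.len cs)).foldl
      (fun st i => stepA newCh st (PySem.List.pyGetD cs i ' ')) ([], 0)
      = cs.foldl (stepA newCh) ([], 0) := by
    have h := PySem.List.foldl_pyRange_pyGetD cs ' ' (stepA newCh) ([], (0 : Int)) (a := 0) le_rfl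
    simpa using h
  rw [hA]
  -- both rebuild passes agree: the iterator never exhausts
  have hlen : 0 + cs.countP PySem.Chars.isalpha ≤ newCh.length := by
    rw [hnew, PySem.List.length_sorted, hl, List.countP_eq_length_filter]
    omega
  exact congrArg String.ofList (by simpa using merge_eq newCh cs 0 [] hlen)
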